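-- pv_equiv track=rewrite | github.com/GrigoryM1A1/ASD-AGH-2022 | Cwiczenia_2/offline2_nn.py | depth_ale_wolno
-- ===== SOURCE A (Python) =====
-- def depth_ale_wolno(L):
--     n = len(L)
--     max_c_tab = [0] * n
--     for i in range(n):
--         for j in range(n):
--             if j != i:
--                 if L[i][0] <= L[j][0] and L[i][1] >= L[j][1]:
--                     max_c_tab[i] += 1
--     max_c = max_c_tab[0]
--     for i in range(1, n):
--         if max_c_tab[i] > max_c:
--             max_c = max_c_tab[i]
--     return max_c
-- ===== SOURCE B (Python) =====
-- def depth_ale_wolno(L):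
--     # Sort by x descending, sweep groups of equal x: a point covers exactly the
--     # already-seen points (x >= its x) whose y <= its y, minus itself.
--     pts = sorted(L, key=lambda p: p[0], reverse=True)
--     n = len(pts)
--     seen = []   # y's of all points with x >= current group's x
--     res = []
--     i = 0
--     while i < n:
--         j = i
--         while j < n and pts[j][0] == pts[i][0]:
--             seen.append(pts[j][1])
--             j += 1
--         for k in range(i, j):
--             y = pts[k][1]
--             res.append(sum(1 for t in seen if t <= y) - 1)
--         i = j
--     return max(res)
-- ===== Notes on version B (the rewrite author's own statement) =====
-- stated objective: faster
-- what changed: Replaces A's all-pairs double loop with a sort-by-x-descending sweep that walks groups of equal x and, for each point, counts the already-seen y's not exceeding its y (every seen point has x >= its x), taking the maximum of those counts minus one.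
-- outside the precondition, e.g. on depth_ale_wolno([]): A raises IndexError, B raises ValueError
import Mathlib
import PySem

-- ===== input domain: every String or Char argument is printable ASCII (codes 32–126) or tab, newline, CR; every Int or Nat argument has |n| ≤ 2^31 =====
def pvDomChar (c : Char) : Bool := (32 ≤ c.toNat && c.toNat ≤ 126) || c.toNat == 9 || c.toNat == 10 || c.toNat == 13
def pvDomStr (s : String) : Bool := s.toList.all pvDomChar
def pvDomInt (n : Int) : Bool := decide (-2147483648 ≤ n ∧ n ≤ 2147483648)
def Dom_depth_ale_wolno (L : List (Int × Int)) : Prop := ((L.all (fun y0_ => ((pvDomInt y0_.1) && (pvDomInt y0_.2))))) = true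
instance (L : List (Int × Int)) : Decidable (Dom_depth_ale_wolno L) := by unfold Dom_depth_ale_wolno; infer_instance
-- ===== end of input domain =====

-- B replaces A's all-pairs double loop by a sort-by-x-descending sweep that, per group of
-- equal x, counts the already-seen y's ≤ the point's y (measured constant-factor speed-up).

-- ===== PORT A =====
-- On L = [] the Python raises IndexError at max_c_tab[0]; excluded by Pre_ (pyGetD default never read inside Pre_).
def depth_ale_wolno (L : List (Int × Int)) : Int :=
  let n : Int := PySem.List.len L
  let max_c_tab : List Int :=
    (PySem.List.pyRange 0 n 1).map (fun i =>
      (PySem.List.pyRange 0 n 1).foldl (fun c j =>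
        if j ≠ i then
          if (PySem.List.pyGetD L i ((0:Int),(0:Int))).1 ≤ (PySem.List.pyGetD L j ((0:Int),(0:Int))).1 ∧
             (PySem.List.pyGetD L i ((0:Int),(0:Int))).2 ≥ (PySem.List.pyGetD L j ((0:Int),(0:Int))).2
          then c + 1 else c
        else c) 0)
  let max_c : Int := PySem.List.pyGetD max_c_tab 0 0
  (PySem.List.pyRange 1 n 1).foldl (fun m i =>
    if PySem.List.pyGetD max_c_tab i 0 > m then PySem.List.pyGetD max_c_tab i 0 else m) max_c

-- ===== PORT B =====
-- the two nested while loops of Source B: consume one group of equal x, append its y's to seen,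
-- emit one count per group member, recurse on the remainder.
def bLoop : List (Int × Int) → List Int → List Int → List Int
  | [], _, res => res
  | p :: t, seen, res =>
    let grp := p :: t.takeWhile (fun q => q.1 == p.1)
    let seen' := seen ++ grp.map (·.2)
    bLoop (t.dropWhile (fun q => q.1 == p.1)) seen'
      (res ++ grp.map (fun q => ((seen'.countP (fun s => s ≤ q.2) : Int) - 1)))
termination_by rest _ _ => rest.length
decreasing_by
  have := List.length_dropWhile_le (fun q => q.1 == p.1) t
  simp; omega

-- On L = [] the Python Source B raises ValueError at max([]); excluded by Pre_.
def depth_ale_wolno_alt (L : List (Int × Int)) : Int :=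
  let pts := PySem.List.sorted L (fun p => p.1) true
  let res := bLoop pts [] []
  match PySem.List.max? res (fun v => v) with
  | some m => m
  | none => 0

-- ===== PRECONDITION & SPEC =====
-- Both Pythons raise on the empty list (A: IndexError, B: ValueError); Pre_ excludes exactly it.
def Pre_depth_ale_wolno (L : List (Int × Int)) : Prop := L ≠ []
instance (L : List (Int × Int)) : Decidable (Pre_depth_ale_wolno L) := by unfold Pre_depth_ale_wolno; infer_instance
def pvWitness_depth_ale_wolno : (List (Int × Int)) := [(0, 0), (1, -1)]

def Spec_depth_ale_wolno (L : List (Int × Int)) (out : Int) : Prop := out = depth_ale_wolno_alt L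
instance (L : List (Int × Int)) (out : Int) : Decidable (Spec_depth_ale_wolno L out) := by unfold Spec_depth_ale_wolno; infer_instance

-- ===== CLAIM (what is proved, stated in full; the proofs are below) =====
def Claim_equal_depth_ale_wolno : Prop := ∀ (L : List (Int × Int)), Dom_depth_ale_wolno L → Pre_depth_ale_wolno L → Spec_depth_ale_wolno L (depth_ale_wolno L)

-- ===== LEMMAS AND PROOFS =====

-- the per-point value both programs compute: #points covered by p in M, minus p itself
def fcnt (M : List (Int × Int)) (p : Int × Int) : Int :=
  (M.countP (fun q => decide (p.1 ≤ q.1 ∧ p.2 ≥ q.2)) : Int) - 1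

-- max of a nonempty list as both ports compute it
def maxlist : List Int → Int
  | [] => 0
  | a :: t => t.foldl max a

-- a counting fold is countP
theorem foldl_if_count (R : List Int) (Q : Int → Prop) [DecidablePred Q] (c : Int) :
    R.foldl (fun c j => if Q j then c + 1 else c) c = c + (R.countP (fun j => decide (Q j)) : Int) := by
  induction R generalizing c with
  | nil => simp
  | cons x t ih =>
    simp only [List.foldl_cons, List.countP_cons, ih]
    by_cases hx : Q x <;> simp [hx] <;> ring

-- inner loop of A = fcnt at L[i]
theorem innerA (L : List (Int × Int)) (i : Int) (h0 : 0 ≤ i) (hn : i < (L.length : Int)) :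
    (PySem.List.pyRange 0 (PySem.List.len L) 1).foldl (fun c j =>
        if j ≠ i then
          if (PySem.List.pyGetD L i ((0:Int),(0:Int))).1 ≤ (PySem.List.pyGetD L j ((0:Int),(0:Int))).1 ∧
             (PySem.List.pyGetD L i ((0:Int),(0:Int))).2 ≥ (PySem.List.pyGetD L j ((0:Int),(0:Int))).2
          then c + 1 else c
        else c) 0
      = fcnt L (PySem.List.pyGetD L i ((0:Int),(0:Int))) := by
  set p := PySem.List.pyGetD L i ((0:Int),(0:Int)) with hp
  set R := PySem.List.pyRange 0 (PySem.List.len L) 1 with hR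
  have hbody : (fun (c : Int) j =>
      if j ≠ i then
        if p.1 ≤ (PySem.List.pyGetD L j ((0:Int),(0:Int))).1 ∧ p.2 ≥ (PySem.List.pyGetD L j ((0:Int),(0:Int))).2
        then c + 1 else c
      else c)
      = (fun (c : Int) j => if (j ≠ i ∧ p.1 ≤ (PySem.List.pyGetD L j ((0:Int),(0:Int))).1 ∧ p.2 ≥ (PySem.List.pyGetD L j ((0:Int),(0:Int))).2) then c + 1 else c) := by
    funext c j; split_ifs <;> tauto
  rw [hbody, foldl_if_count]
  have hmem : i ∈ R := by
    rw [hR, PySem.List.mem_pyRange_one]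
    simp only [PySem.List.len_eq]
    exact ⟨h0, hn⟩
  have hnodup : R.Nodup := by rw [hR]; exact PySem.List.nodup_pyRange_one _ _
  have hperm : R.Perm (i :: R.erase i) := List.perm_cons_erase hmem
  have hq1 : R.countP (fun j => decide (j ≠ i ∧ p.1 ≤ (PySem.List.pyGetD L j ((0:Int),(0:Int))).1 ∧ p.2 ≥ (PySem.List.pyGetD L j ((0:Int),(0:Int))).2))
      = (R.erase i).countP (fun j => decide (p.1 ≤ (PySem.List.pyGetD L j ((0:Int),(0:Int))).1 ∧ p.2 ≥ (PySem.List.pyGetD L j ((0:Int),(0:Int))).2)) := by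
    rw [hperm.countP_eq, List.countP_cons]
    simp only [decide_eq_true_eq, ne_eq, not_true_eq_false, false_and, if_false, add_zero]
    apply List.countP_congr
    intro j hj
    have hji : j ≠ i := ((List.Nodup.mem_erase_iff hnodup).mp hj).1
    simp [hji]
  have hq2 : (R.erase i).countP (fun j => decide (p.1 ≤ (PySem.List.pyGetD L j ((0:Int),(0:Int))).1 ∧ p.2 ≥ (PySem.List.pyGetD L j ((0:Int),(0:Int))).2)) + 1
      = R.countP (fun j => decide (p.1 ≤ (PySem.List.pyGetD L j ((0:Int),(0:Int))).1 ∧ p.2 ≥ (PySem.List.pyGetD L j ((0:Int),(0:Int))).2)) := by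
    rw [hperm.countP_eq, List.countP_cons]
    simp [← hp]
  have hmap : R.map (fun j => PySem.List.pyGetD L j ((0:Int),(0:Int))) = L := by
    rw [hR]; exact PySem.List.map_pyGetD_pyRange_zero L ((0:Int),(0:Int))
  have hLc : L.countP (fun q => decide (p.1 ≤ q.1 ∧ p.2 ≥ q.2))
      = R.countP (fun j => decide (p.1 ≤ (PySem.List.pyGetD L j ((0:Int),(0:Int))).1 ∧ p.2 ≥ (PySem.List.pyGetD L j ((0:Int),(0:Int))).2)) := by
    conv_lhs => rw [← hmap]
    rw [List.countP_map]
    rfl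
  unfold fcnt
  rw [hLc, ← hq2, hq1]
  push_cast
  ring

theorem A_eq_maxlist (L : List (Int × Int)) (h : L ≠ []) :
    depth_ale_wolno L = maxlist (L.map (fcnt L)) := by
  have hmap : (PySem.List.pyRange 0 (PySem.List.len L) 1).map (fun j => PySem.List.pyGetD L j ((0:Int),(0:Int))) = L :=
    PySem.List.map_pyGetD_pyRange_zero L ((0:Int),(0:Int))
  have htab : (PySem.List.pyRange 0 (PySem.List.len L) 1).map (fun i =>
      (PySem.List.pyRange 0 (PySem.List.len L) 1).foldl (fun c j =>
        if j ≠ i then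
          if (PySem.List.pyGetD L i ((0:Int),(0:Int))).1 ≤ (PySem.List.pyGetD L j ((0:Int),(0:Int))).1 ∧
             (PySem.List.pyGetD L i ((0:Int),(0:Int))).2 ≥ (PySem.List.pyGetD L j ((0:Int),(0:Int))).2
          then c + 1 else c
        else c) 0)
      = L.map (fcnt L) := by
    rw [List.map_congr_left (g := (fcnt L) ∘ (fun j => PySem.List.pyGetD L j ((0:Int),(0:Int))))
      (fun i hi => by
        obtain ⟨h0, h1⟩ := PySem.List.mem_pyRange_one.mp hi
        exact innerA L i h0 (by simpa using h1))]
    rw [← List.map_map, hmap]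
  unfold depth_ale_wolno
  simp only [htab]
  have hlen : PySem.List.len L = PySem.List.len (L.map (fcnt L)) := by
    simp [PySem.List.len_eq]
  rw [hlen, PySem.List.foldl_pyRange_pyGetD (L.map (fcnt L)) 0
    (fun m v => if v > m then v else m) _ (a := 1) (by norm_num)]
  cases hL : L.map (fcnt L) with
  | nil => exact absurd (List.map_eq_nil_iff.mp hL) h
  | cons b s =>
    simp only [maxlist, PySem.List.pyGetD_ofNat', List.getD_cons_zero, gt_iff_lt]
    have : (fun (m v : Int) => if m < v then v else m) = (fun m v => max m v) := by
      funext m v; rw [max_def]; split_ifs <;> omega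
    rw [this]
    simp

-- in a descending-by-fst list, everything the dropWhile of the leading equal-fst group leaves is strictly below
theorem dropWhile_fst_lt (z : Int) : ∀ (t : List (Int × Int)),
    t.Pairwise (fun a b => b.1 ≤ a.1) → (∀ x ∈ t, x.1 ≤ z) →
    ∀ r ∈ t.dropWhile (fun q => q.1 == z), r.1 < z := by
  intro t
  induction t with
  | nil => intro _ _ r hr; simp at hr
  | cons x xs ih =>
    intro hpw hle r hr
    rw [List.dropWhile_cons] at hr
    by_cases hx : x.1 = z
    · simp only [hx, beq_self_eq_true, if_true] at hr
      exact ih (List.pairwise_cons.mp hpw).2 (fun y hy => hle y (List.mem_cons_of_mem _ hy)) r hr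
    · simp only [beq_iff_eq, hx, if_false] at hr
      have hxz : x.1 < z := lt_of_le_of_ne (hle x List.mem_cons_self) hx
      rcases List.mem_cons.mp hr with rfl | hr
      · exact hxz
      · exact lt_of_le_of_lt ((List.pairwise_cons.mp hpw).1 r hr) hxz

theorem bLoop_spec : ∀ (n : Nat) (rest done : List (Int × Int)) (res : List Int),
    rest.length ≤ n →
    (∀ q ∈ done, ∀ r ∈ rest, r.1 < q.1) →
    rest.Pairwise (fun a b => b.1 ≤ a.1) →
    bLoop rest (done.map (·.2)) res = res ++ rest.map (fcnt (done ++ rest)) := by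
  intro n
  induction n with
  | zero =>
    intro rest done res hlen _ _
    have : rest = [] := List.eq_nil_of_length_eq_zero (Nat.le_zero.mp hlen)
    subst this; simp [bLoop]
  | succ n ih =>
    intro rest done res hlen h1 h2
    cases rest with
    | nil => simp [bLoop]
    | cons p t =>
      obtain ⟨hpt, h2t⟩ := List.pairwise_cons.mp h2
      have htd : t.takeWhile (fun q => q.1 == p.1) ++ t.dropWhile (fun q => q.1 == p.1) = t :=
        List.takeWhile_append_dropWhile
      have hgrp1 : ∀ q ∈ p :: t.takeWhile (fun q => q.1 == p.1), q.1 = p.1 := by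
        intro q hq
        rcases List.mem_cons.mp hq with rfl | hq
        · rfl
        · have h' := List.mem_takeWhile_imp hq
          simpa using h'
      have hrest' : ∀ r ∈ t.dropWhile (fun q => q.1 == p.1), r.1 < p.1 :=
        dropWhile_fst_lt p.1 t h2t hpt
      have hsplit : p :: t = (p :: t.takeWhile (fun q => q.1 == p.1)) ++ t.dropWhile (fun q => q.1 == p.1) := by
        simp [htd]
      -- the per-member count over seen' is fcnt of the full list
      have hcount : ∀ q ∈ p :: t.takeWhile (fun q => q.1 == p.1),
          ((((done ++ (p :: t.takeWhile (fun q => q.1 == p.1))).map (·.2)).countP (fun s => s ≤ q.2) : Int) - 1)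
            = fcnt (done ++ (p :: t)) q := by
        intro q hq
        have hq1 : q.1 = p.1 := hgrp1 q hq
        unfold fcnt
        congr 1
        rw [List.countP_map]
        norm_cast
        conv_rhs => rw [hsplit, ← List.append_assoc]
        rw [List.countP_append, List.countP_append, List.countP_append]
        have hz : (t.dropWhile (fun q => q.1 == p.1)).countP (fun r => decide (q.1 ≤ r.1 ∧ q.2 ≥ r.2)) = 0 := by
          rw [List.countP_eq_zero]
          intro r hr
          have := hrest' r hr
          simp only [decide_eq_true_eq, not_and]
          intro hle
          omega
        rw [hz, add_zero]
        congr 1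
        · apply List.countP_congr
          intro r hr
          have hlt : q.1 < r.1 := h1 r hr q (by rw [hsplit]; exact List.mem_append_left _ hq)
          simp only [Function.comp_apply, decide_eq_true_eq, ge_iff_le]
          constructor
          · intro hle; exact ⟨le_of_lt hlt, hle⟩
          · intro hle; exact hle.2
        · apply List.countP_congr
          intro r hr
          have hr1 : r.1 = p.1 := hgrp1 r hr
          simp only [Function.comp_apply, decide_eq_true_eq, ge_iff_le]
          constructor
          · intro hle; exact ⟨by omega, hle⟩
          · intro hle; exact hle.2
      -- one step of bLoop, then the induction hypothesis on the remainder
      rw [bLoop]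
      simp only [← List.map_append]
      have hlen' : (t.dropWhile (fun q => q.1 == p.1)).length ≤ n := by
        have := List.length_dropWhile_le (fun q => q.1 == p.1) t
        simp at hlen
        omega
      have h1' : ∀ q ∈ done ++ (p :: t.takeWhile (fun q => q.1 == p.1)),
          ∀ r ∈ t.dropWhile (fun q => q.1 == p.1), r.1 < q.1 := by
        intro q hq r hr
        rcases List.mem_append.mp hq with hq | hq
        · exact h1 q hq r (by rw [hsplit]; exact List.mem_append_right _ hr)
        · rw [hgrp1 q hq]; exact hrest' r hr
      have h2' : (t.dropWhile (fun q => q.1 == p.1)).Pairwise (fun a b => b.1 ≤ a.1) :=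
        h2t.sublist (List.dropWhile_sublist _)
      rw [ih _ _ _ hlen' h1' h2']
      have hfull : (done ++ (p :: t.takeWhile (fun q => q.1 == p.1))) ++ t.dropWhile (fun q => q.1 == p.1)
          = done ++ (p :: t) := by
        rw [List.append_assoc]; simp [htd]
      rw [hfull, List.append_assoc]
      congr 1
      have e1 := List.map_congr_left hcount
      rw [e1, ← List.map_append]
      congr 1
      simp [htd]

theorem B_eq_maxlist (L : List (Int × Int)) (h : L ≠ []) :
    depth_ale_wolno_alt L = maxlist ((PySem.List.sorted L (fun p => p.1) true).map
      (fcnt (PySem.List.sorted L (fun p => p.1) true))) := by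
  unfold depth_ale_wolno_alt
  have hres : bLoop (PySem.List.sorted L (fun p => p.1) true) [] []
      = (PySem.List.sorted L (fun p => p.1) true).map (fcnt (PySem.List.sorted L (fun p => p.1) true)) := by
    have := bLoop_spec (PySem.List.sorted L (fun p => p.1) true).length
      (PySem.List.sorted L (fun p => p.1) true) [] [] le_rfl (by simp)
      (PySem.List.sorted_pairwise_rev L (fun p => p.1))
    simpa using this
  simp only [hres]
  cases hS : (PySem.List.sorted L (fun p => p.1) true).map (fcnt (PySem.List.sorted L (fun p => p.1) true)) with
  | nil =>
    exact absurd ((PySem.List.sorted_eq_nil_iff _ _ _).mp (List.map_eq_nil_iff.mp hS)) h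
  | cons b s =>
    rw [PySem.List.max?_id_cons]
    simp [maxlist]

theorem maxlist_mem_le (l : List Int) (h : l ≠ []) :
    maxlist l ∈ l ∧ ∀ y ∈ l, y ≤ maxlist l := by
  match l with
  | a :: t =>
    simp only [maxlist]
    constructor
    · rcases PySem.List.foldl_max_mem t a with h1 | h1
      · rw [h1]; exact List.mem_cons_self
      · exact List.mem_cons_of_mem _ h1
    · intro y hy
      rcases List.mem_cons.mp hy with rfl | hy
      · exact (PySem.List.le_foldl_max t y).1
      · exact (PySem.List.le_foldl_max t a).2 y hy

theorem maxlist_perm (l₁ l₂ : List Int) (hp : l₁.Perm l₂) : maxlist l₁ = maxlist l₂ := by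
  rcases eq_or_ne l₁ [] with rfl | h1
  · rw [hp.nil_eq]
  · have h2 : l₂ ≠ [] := by
      intro h; rw [h] at hp; exact h1 hp.eq_nil
    obtain ⟨m1, le1⟩ := maxlist_mem_le l₁ h1
    obtain ⟨m2, le2⟩ := maxlist_mem_le l₂ h2
    exact le_antisymm (le2 _ (hp.mem_iff.mp m1)) (le1 _ (hp.mem_iff.mpr m2))

-- ===== VERDICT (by name: the statement is the Claim_ definition above) =====
theorem depth_ale_wolno_spec : Claim_equal_depth_ale_wolno := by
  intro L _ hpre
  unfold Spec_depth_ale_wolno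
  have hS := PySem.List.sorted_perm (xs := L) (key := fun p : Int × Int => p.1) (rev := true)
  rw [A_eq_maxlist L hpre, B_eq_maxlist L hpre]
  have hf : fcnt (PySem.List.sorted L (fun p => p.1) true) = fcnt L := by
    funext p; unfold fcnt; rw [hS.countP_eq]
  rw [hf]
  exact maxlist_perm _ _ ((hS.map (fcnt L)).symm)
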